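-- pv_equiv track=rewrite | github.com/mfarhanz/terminal-sudoku | terminalsudoku.py | check_digit_list
-- ===== SOURCE A (Python) =====
-- def check_digit_list(lst, strict=True):
--     if strict:
--         return set(lst) == set(range(1, 10))
--     else:
--         seen = set()
--         for digit in lst:
--             if digit != 0:
--                 if digit in seen:
--                     return False
--                 seen.add(digit)
--         return True
-- ===== SOURCE B (Python) =====
-- def check_digit_list(lst, strict=True):
--     counts = {}
--     for d in lst:
--         counts[d] = counts.get(d, 0) + 1
--     if strict:
--         return set(counts) == set(range(1, 10))
--     return all(counts[d] <= 1 for d in counts if d != 0)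
-- ===== Notes on version B (the rewrite author's own statement) =====
-- stated objective: alternative
-- what changed: Replaces the strict set comparison / non-strict early-exit seen-set loop with one precomputed frequency table (dict built in a single pass) whose key set answers the strict check and whose counts answer the non-strict check.
import Mathlib
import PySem

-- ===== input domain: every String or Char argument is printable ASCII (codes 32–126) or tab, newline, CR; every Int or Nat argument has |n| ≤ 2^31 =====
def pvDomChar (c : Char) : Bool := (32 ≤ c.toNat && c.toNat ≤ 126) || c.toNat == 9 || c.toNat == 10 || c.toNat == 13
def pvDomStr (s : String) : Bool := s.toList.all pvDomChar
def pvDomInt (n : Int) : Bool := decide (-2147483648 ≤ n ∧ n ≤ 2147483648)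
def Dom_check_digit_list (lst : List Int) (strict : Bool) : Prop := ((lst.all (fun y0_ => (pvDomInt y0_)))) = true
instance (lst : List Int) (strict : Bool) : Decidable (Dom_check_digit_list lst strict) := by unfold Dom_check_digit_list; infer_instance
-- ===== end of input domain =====

-- B replaces A's strict set comparison / non-strict early-exit seen-set loop by one frequency
-- table built in a single pass, then a predicate over its keys/counts (objective: alternative).

-- ===== PORT A =====
-- the non-strict 'for digit in lst' loop with early 'return False', carrying the 'seen' set
def check_digit_list_loop (lst : List Int) (seen : PySem.Set Int) : Bool :=
  match lst with
  | [] => true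
  | digit :: rest =>
      if digit ≠ 0 then
        if PySem.Set.contains seen digit then false
        else check_digit_list_loop rest (PySem.Set.add seen digit)
      else check_digit_list_loop rest seen

def check_digit_list (lst : List Int) (strict : Bool) : Bool :=
  if strict then
    PySem.Set.equal (PySem.Set.ofList lst) (PySem.Set.ofList (PySem.List.pyRange 1 10 1))
  else
    check_digit_list_loop lst PySem.Set.empty

-- ===== PORT B =====
def check_digit_list_alt (lst : List Int) (strict : Bool) : Bool :=
  let counts : PySem.Dict Int Int :=
    lst.foldl (fun d x => d.insert x (d.getD x 0 + 1)) PySem.Dict.empty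
  if strict then
    PySem.Set.equal (PySem.Set.ofList counts.keys) (PySem.Set.ofList (PySem.List.pyRange 1 10 1))
  else
    -- all(counts[d] <= 1 for d in counts if d != 0); counts[d] with d a key is getD d 0
    counts.keys.all (fun d => if d ≠ 0 then decide (counts.getD d 0 ≤ 1) else true)

-- ===== PRECONDITION & SPEC =====
def Spec_check_digit_list (lst : List Int) (strict : Bool) (out : Bool) : Prop := out = check_digit_list_alt lst strict
instance (lst : List Int) (strict : Bool) (out : Bool) : Decidable (Spec_check_digit_list lst strict out) := by unfold Spec_check_digit_list; infer_instance

-- ===== CLAIM (what is proved, stated in full; the proofs are below) =====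
def Claim_equal_check_digit_list : Prop := ∀ (lst : List Int) (strict : Bool), Dom_check_digit_list lst strict → Spec_check_digit_list lst strict (check_digit_list lst strict)

-- ===== LEMMAS AND PROOFS =====

-- A's early-exit loop succeeds iff the nonzero elements are pairwise distinct and avoid 'seen'
theorem check_digit_list_loop_iff (lst : List Int) (seen : PySem.Set Int) :
    check_digit_list_loop lst seen = true ↔
      ((lst.filter (fun d => d ≠ 0)).Nodup ∧ ∀ d ∈ lst, d ≠ 0 → d ∉ seen) := by
  induction lst generalizing seen with
  | nil => simp [check_digit_list_loop]
  | cons digit rest ih =>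
    by_cases h0 : digit = 0
    · subst h0
      simp [check_digit_list_loop, ih]
    · by_cases hs : digit ∈ seen
      · simp only [check_digit_list_loop, if_pos h0]
        rw [if_pos (by simpa [PySem.Set.contains_iff] using hs)]
        constructor
        · intro h; exact absurd h (by simp)
        · rintro ⟨-, hall⟩
          exact absurd hs (hall digit (by simp) h0)
      · simp only [check_digit_list_loop, if_pos h0]
        rw [if_neg (by simpa [PySem.Set.contains_iff] using hs)]
        rw [ih]
        constructor
        · rintro ⟨hnd, hall⟩
          refine ⟨?_, ?_⟩
          · rw [List.filter_cons, if_pos (by simp [h0])]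
            refine List.Nodup.cons ?_ hnd
            intro hm
            rcases List.mem_filter.mp hm with ⟨hmem, hne⟩
            have := hall digit hmem (by simpa using hne)
            rw [PySem.Set.mem_add] at this
            exact this (Or.inr rfl)
          · intro d hd hdne
            rw [List.mem_cons] at hd
            rcases hd with hd | hd
            · subst hd; exact hs
            · have := hall d hd hdne
              rw [PySem.Set.mem_add] at this
              intro hc; exact this (Or.inl hc)
        · rintro ⟨hnd, hall⟩
          rw [List.filter_cons, if_pos (by simp [h0])] at hnd
          rcases List.nodup_cons.mp hnd with ⟨hnm, hnd'⟩
          refine ⟨hnd', ?_⟩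
          intro d hd hdne
          rw [PySem.Set.mem_add]
          rintro (hc | hc)
          · exact hall d (by simp [hd]) hdne hc
          · subst hc
            exact hnm (List.mem_filter.mpr ⟨hd, by simpa using hdne⟩)

theorem check_digit_list_spec : Claim_equal_check_digit_list := by
  intro lst strict _
  unfold Spec_check_digit_list check_digit_list check_digit_list_alt
  have hc : lst.foldl (fun d x => d.insert x (d.getD x 0 + 1)) PySem.Dict.empty
      = PySem.Dict.counter lst := PySem.Dict.foldl_insert_getD_add_one_eq_counter lst
  rw [hc]
  simp only [PySem.Dict.keys_counter]
  cases strict with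
  | true =>
    rw [if_pos rfl, if_pos rfl, PySem.Set.ofList_ofList]
  | false =>
    rw [if_neg Bool.false_ne_true, if_neg Bool.false_ne_true]
    rcases Bool.eq_false_or_eq_true (check_digit_list_loop lst PySem.Set.empty) with hl | hl <;> rw [hl]
    · symm
      rw [check_digit_list_loop_iff] at hl
      rcases hl with ⟨hnd, -⟩
      rw [List.all_eq_true]
      intro a ha
      by_cases ha0 : a = 0
      · simp [ha0]
      · rw [if_pos (by simpa using ha0)]
        rw [PySem.Dict.getD_counter]
        rw [List.nodup_iff_count_le_one] at hnd
        have h1 := hnd a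
        rw [List.count_filter (by simp [ha0])] at h1
        exact decide_eq_true (by exact_mod_cast h1)
    · symm
      rw [Bool.eq_false_iff] at hl ⊢
      intro hall
      apply hl
      rw [check_digit_list_loop_iff]
      refine ⟨?_, by simp [PySem.Set.empty]⟩
      rw [List.nodup_iff_count_le_one]
      intro a
      by_cases ha : a = 0
      · subst ha
        rw [List.count_eq_zero.mpr (by simp)]
        exact Nat.zero_le 1
      · rw [List.all_eq_true] at hall
        by_cases hm : a ∈ lst
        · have := hall a ((PySem.Set.mem_ofList lst a).mpr hm)
          rw [if_pos (by simpa using ha)] at this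
          rw [PySem.Dict.getD_counter] at this
          have hle : lst.count a ≤ 1 := by exact_mod_cast of_decide_eq_true this
          exact le_trans (List.filter_sublist.count_le a) hle
        · rw [List.count_eq_zero.mpr (fun h => hm (List.mem_of_mem_filter h))]
          exact Nat.zero_le 1

-- ===== VERDICT (by name: the statement is the Claim_ definition above) =====
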